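-- pv_equiv track=rewrite | github.com/lemessaA/youtube-agent | backend/agents/title_description_agent.py | create_timestamps
-- ===== SOURCE A (Python) =====
-- from typing import Dict, Any, List
--
-- def create_timestamps(script_points: List[str], estimated_duration: int) -> List[Dict[str, str]]:
--     """Generate timestamps for video sections"""
--     timestamps = []
--     current_time = 0
--
--     # Add intro
--     timestamps.append({"time": "0:00", "title": "Introduction"})
--     current_time += 10
--
--     # Add main points
--     if script_points:
--         duration_per_point = (estimated_duration - 30) // len(script_points)
--         for i, point in enumerate(script_points):
--             minutes = current_time // 60
--             seconds = current_time % 60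
--             timestamps.append({
--                 "time": f"{minutes}:{seconds:02d}",
--                 "title": point[:30] + "..." if len(point) > 30 else point
--             })
--             current_time += duration_per_point
--
--     # Add outro
--     minutes = current_time // 60
--     seconds = current_time % 60
--     timestamps.append({"time": f"{minutes}:{seconds:02d}", "title": "Conclusion"})
--
--     return timestamps
-- ===== SOURCE B (Python) =====
-- def _fmt_entry(t, title):
--     return {
--         "time": f"{t // 60}:{t % 60:02d}",
--         "title": title[:30] + "..." if len(title) > 30 else title,
--     }
--
--
-- def create_timestamps(script_points, estimated_duration):
--     n = len(script_points)
--     descriptors = [(0, "Introduction")]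
--     if script_points:
--         duration_per_point = (estimated_duration - 30) // n
--         descriptors += [(10 + i * duration_per_point, p)
--                         for i, p in enumerate(script_points)]
--         descriptors.append((10 + n * duration_per_point, "Conclusion"))
--     else:
--         descriptors.append((10, "Conclusion"))
--     return [_fmt_entry(t, title) for t, title in descriptors]
-- ===== Notes on version B (the rewrite author's own statement) =====
-- stated objective: alternative
-- what changed: Replaces A's running current_time accumulator with interleaved formatting-and-emission by a two-pass structure: first build a flat descriptor list (start time computed from position: intro 0, point i at 10+i*dpp, outro 10+n*dpp), then map a single formatting helper over it.
import Mathlib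
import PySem

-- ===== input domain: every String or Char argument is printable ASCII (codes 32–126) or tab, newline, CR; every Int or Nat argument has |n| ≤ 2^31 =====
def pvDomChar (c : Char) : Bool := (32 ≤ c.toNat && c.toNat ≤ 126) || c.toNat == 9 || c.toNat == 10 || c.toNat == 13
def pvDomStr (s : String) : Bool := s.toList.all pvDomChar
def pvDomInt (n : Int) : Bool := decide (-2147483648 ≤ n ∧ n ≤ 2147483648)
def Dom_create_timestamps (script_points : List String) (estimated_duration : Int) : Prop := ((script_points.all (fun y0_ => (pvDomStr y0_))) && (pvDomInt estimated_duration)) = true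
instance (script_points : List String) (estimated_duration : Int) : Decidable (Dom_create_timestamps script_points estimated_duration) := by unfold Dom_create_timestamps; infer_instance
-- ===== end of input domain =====

-- B replaces A's running-time accumulator and interleaved emission with a two-pass
-- build-descriptors-then-format structure (objective: alternative decomposition, same cost).

-- ===== PORT A =====
-- Literal port of A: running accumulator `timestamps`, running `current_time`,
-- the per-point formatting inlined in the loop body exactly as in the Python.
-- f"{seconds:02d}" is ported as zfill of str(seconds) (exact for the nonnegative
-- seconds Python's % 60 produces).
def create_timestamps (script_points : List String) (estimated_duration : Int) : List (List (String × String)) :=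
  let timestamps : List (List (String × String)) := [[("time", "0:00"), ("title", "Introduction")]]
  let current_time : Int := 10
  let st :=
    if script_points ≠ [] then
      let duration_per_point := PySem.Int.floordiv (estimated_duration - 30) (script_points.length : Int)
      script_points.foldl (fun (st : List (List (String × String)) × Int) point =>
        let minutes := PySem.Int.floordiv st.2 60
        let seconds := PySem.Int.mod st.2 60
        (st.1 ++ [[("time", PySem.Int.toStr minutes ++ ":" ++ PySem.Str.zfill (PySem.Int.toStr seconds) 2),
                   ("title", if (30 : Int) < PySem.Str.len point
                             then PySem.Str.slice point none (some 30) ++ "..."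
                             else point)]],
         st.2 + duration_per_point)) (timestamps, current_time)
    else (timestamps, current_time)
  st.1 ++ [[("time", PySem.Int.toStr (PySem.Int.floordiv st.2 60) ++ ":" ++ PySem.Str.zfill (PySem.Int.toStr (PySem.Int.mod st.2 60)) 2),
            ("title", "Conclusion")]]

-- ===== PORT B =====
-- _fmt_entry from Source B
def pvFmtEntry (t : Int) (title : String) : List (String × String) :=
  [("time", PySem.Int.toStr (PySem.Int.floordiv t 60) ++ ":" ++ PySem.Str.zfill (PySem.Int.toStr (PySem.Int.mod t 60)) 2),
   ("title", if (30 : Int) < PySem.Str.len title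
             then PySem.Str.slice title none (some 30) ++ "..."
             else title)]

def create_timestamps_alt (script_points : List String) (estimated_duration : Int) : List (List (String × String)) :=
  let n : Int := script_points.length
  let descriptors : List (Int × String) :=
    [((0 : Int), "Introduction")] ++
    (if script_points ≠ [] then
       let duration_per_point := PySem.Int.floordiv (estimated_duration - 30) n
       (PySem.List.enumerate script_points).map (fun ip => (10 + ip.1 * duration_per_point, ip.2)) ++
         [(10 + n * duration_per_point, "Conclusion")]
     else [((10 : Int), "Conclusion")])
  descriptors.map (fun d => pvFmtEntry d.1 d.2)

-- ===== PRECONDITION & SPEC =====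
def Spec_create_timestamps (script_points : List String) (estimated_duration : Int) (out : List (List (String × String))) : Prop := out = create_timestamps_alt script_points estimated_duration
instance (script_points : List String) (estimated_duration : Int) (out : List (List (String × String))) : Decidable (Spec_create_timestamps script_points estimated_duration out) := by unfold Spec_create_timestamps; infer_instance

-- ===== CLAIM (what is proved, stated in full; the proofs are below) =====
def Claim_equal_create_timestamps : Prop := ∀ (script_points : List String) (estimated_duration : Int), Dom_create_timestamps script_points estimated_duration → Spec_create_timestamps script_points estimated_duration (create_timestamps script_points estimated_duration)

-- ===== LEMMAS AND PROOFS =====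

-- The rows A's loop emits, by structural recursion on the points.
def pvRows (dpp : Int) (ct : Int) : List String → List (List (String × String))
  | [] => []
  | p :: l => pvFmtEntry ct p :: pvRows dpp (ct + dpp) l

lemma foldA (dpp : Int) (l : List String) (acc : List (List (String × String))) (ct : Int) :
    l.foldl (fun (st : List (List (String × String)) × Int) point =>
        (st.1 ++ [[("time", PySem.Int.toStr (PySem.Int.floordiv st.2 60) ++ ":" ++ PySem.Str.zfill (PySem.Int.toStr (PySem.Int.mod st.2 60)) 2),
                   ("title", if (30 : Int) < PySem.Str.len point
                             then PySem.Str.slice point none (some 30) ++ "..."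
                             else point)]],
         st.2 + dpp)) (acc, ct)
      = (acc ++ pvRows dpp ct l, ct + l.length * dpp) := by
  induction l generalizing acc ct with
  | nil => simp [pvRows]
  | cons p l ih =>
      simp only [List.foldl_cons, ih, pvRows, pvFmtEntry, Prod.mk.injEq]
      refine ⟨by simp, by simp only [List.length_cons]; push_cast; ring⟩

lemma mapB (dpp : Int) (l : List String) (b s : Int) :
    (PySem.List.enumerate l s).map (fun ip => pvFmtEntry (b + ip.1 * dpp) ip.2)
      = pvRows dpp (b + s * dpp) l := by
  induction l generalizing s with
  | nil => simp [PySem.List.enumerate_nil, pvRows]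
  | cons p l ih =>
      simp only [PySem.List.enumerate_cons, List.map_cons, pvRows, ih]
      have harith : b + (s + 1) * dpp = b + s * dpp + dpp := by ring
      rw [harith]

lemma introRow : [(("time" : String), ("0:00" : String)), ("title", "Introduction")] = pvFmtEntry 0 "Introduction" := by
  decide

lemma outroRow (t : Int) :
    [(("time" : String), PySem.Int.toStr (PySem.Int.floordiv t 60) ++ ":" ++ PySem.Str.zfill (PySem.Int.toStr (PySem.Int.mod t 60)) 2),
     ("title", ("Conclusion" : String))] = pvFmtEntry t "Conclusion" := by
  have h : ¬ ((30 : Int) < PySem.Str.len "Conclusion") := by decide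
  simp only [pvFmtEntry, h, if_false]

-- ===== VERDICT (by name: the statement is the Claim_ definition above) =====
theorem create_timestamps_spec : Claim_equal_create_timestamps := by
  intro sp d _
  unfold Spec_create_timestamps create_timestamps create_timestamps_alt
  by_cases h : sp = []
  · subst h
    simp only [ne_eq, not_true_eq_false, if_false, List.singleton_append, List.map_cons, List.map_nil]
    rw [← introRow, ← outroRow]
  · simp only [ne_eq, h, not_false_eq_true, if_true]
    rw [foldA]
    have hm := mapB (PySem.Int.floordiv (d - 30) (sp.length : Int)) sp 10 0
    simp only [zero_mul, add_zero] at hm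
    simp only [List.map_append, List.map_cons, List.map_nil, List.map_map, Function.comp_def]
    rw [← introRow, ← outroRow, hm]
    simp
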